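-- pv_equiv track=rewrite | github.com/MrBrantCode/unitest_baseline | mut_generate/mist_train_taco/taco_14928/solution.py | calculate_minimum_trip_cost
-- ===== SOURCE A (Python) =====
-- import itertools
--
-- def calculate_minimum_trip_cost(n, m, plst, abclst):
--     sec = [0] * n
--     for (pi, pi1) in zip(plst, plst[1:]):
--         (p1, p2) = (min(pi, pi1) - 1, max(pi, pi1) - 1)
--         sec[p1] += 1
--         sec[p2] -= 1
--     sec = tuple(itertools.accumulate(sec))
--     ans = 0
--     for i in range(n - 1):
--         (a, b, c) = abclst[i]
--         s = sec[i]
--         ans += min(a * s, b * s + c)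
--     return ans
-- ===== SOURCE B (Python) =====
-- def calculate_minimum_trip_cost(n, m, plst, abclst):
--     sec = [0] * n
--     for pi, pi1 in zip(plst, plst[1:]):
--         lo, hi = min(pi, pi1) - 1, max(pi, pi1) - 1
--         for j in range(lo, hi):
--             sec[j] += 1
--     return sum(min(a * s, b * s + c)
--                for (a, b, c), s in zip(abclst[:n - 1], sec))
-- ===== Notes on version B (the rewrite author's own statement) =====
-- stated objective: alternative
-- what changed: Replaces A's difference-array two-point updates plus itertools.accumulate prefix-sum with a direct per-segment fill (incrementing every segment of each leg), and computes the total with a zip/sum over the sliced fare table instead of an index loop.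
-- intended difference: On inputs with a consecutive stop pair whose smaller stop is <= 0 and larger stop is >= 1 (stations are 1..n, so such input is malformed), A's sec updates land at the array's far end via negative-index wraparound and give an accidental total (0 at the witness (2,1,[0,2],[(1,1,1)])), while B charges exactly the listed segments of that leg (1 there), the intended per-segment cost. — e.g. on calculate_minimum_trip_cost(2, 1, [0, 2], [(1, 1, 1)]): A returns 0, B returns 1
import Mathlib
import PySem

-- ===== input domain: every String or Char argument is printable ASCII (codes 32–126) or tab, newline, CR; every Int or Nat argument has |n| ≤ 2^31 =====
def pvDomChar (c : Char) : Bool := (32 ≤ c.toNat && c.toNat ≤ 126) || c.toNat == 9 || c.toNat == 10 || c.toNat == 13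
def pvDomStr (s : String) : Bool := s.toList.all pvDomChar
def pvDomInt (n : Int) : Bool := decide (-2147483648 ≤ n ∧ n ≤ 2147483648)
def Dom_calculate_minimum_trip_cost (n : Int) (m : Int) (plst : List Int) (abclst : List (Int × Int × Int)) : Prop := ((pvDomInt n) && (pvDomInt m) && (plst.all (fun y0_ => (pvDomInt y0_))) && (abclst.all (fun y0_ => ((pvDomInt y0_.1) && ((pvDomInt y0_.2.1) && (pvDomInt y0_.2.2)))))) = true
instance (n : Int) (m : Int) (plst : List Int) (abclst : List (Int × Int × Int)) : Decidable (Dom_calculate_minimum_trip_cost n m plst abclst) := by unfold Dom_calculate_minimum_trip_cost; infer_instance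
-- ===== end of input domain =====

-- B replaces A's difference-array two-point updates plus accumulate with a direct
-- per-segment fill and a zip/sum cost computation (objective: alternative, not faster).

-- ===== PORT A =====
-- Python's `sec[k] += v` (negative k counts from the end; out of range raises, here a
-- no-op — such inputs are excluded by Pre_).
def pvAddAt (xs : List Int) (k : Int) (v : Int) : List Int :=
  let j : Int := if k < 0 then k + xs.length else k
  if 0 ≤ j then xs.modify j.toNat (· + v) else xs

-- itertools.accumulate
def pvAcc (s : Int) : List Int → List Int
  | [] => []
  | x :: xs => (s + x) :: pvAcc (s + x) xs

def calculate_minimum_trip_cost (n : Int) (m : Int) (plst : List Int) (abclst : List (Int × Int × Int)) : Int :=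
  let sec0 : List Int := List.replicate n.toNat 0
  let secd := (plst.zip (PySem.List.slice plst (some 1) none)).foldl
    (fun sec pr =>
      let p1 := min pr.1 pr.2 - 1
      let p2 := max pr.1 pr.2 - 1
      pvAddAt (pvAddAt sec p1 1) p2 (-1)) sec0
  let sec := pvAcc 0 secd
  (PySem.List.pyRange 0 (n - 1) 1).foldl
    (fun ans i =>
      let abc := PySem.List.pyGetD abclst i (0, 0, 0)
      let s := PySem.List.pyGetD sec i 0
      ans + min (abc.1 * s) (abc.2.1 * s + abc.2.2)) 0

-- ===== PORT B =====
def calculate_minimum_trip_cost_alt (n : Int) (m : Int) (plst : List Int) (abclst : List (Int × Int × Int)) : Int :=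
  let sec := (plst.zip (PySem.List.slice plst (some 1) none)).foldl
    (fun sec pr =>
      let lo := min pr.1 pr.2 - 1
      let hi := max pr.1 pr.2 - 1
      (PySem.List.pyRange lo hi 1).foldl (fun s j => pvAddAt s j 1) sec)
    (List.replicate n.toNat 0)
  (((PySem.List.slice abclst none (some (n - 1))).zip sec).map
    (fun x => min (x.1.1 * x.2) (x.1.2.1 * x.2 + x.1.2.2))).sum

-- ===== PRECONDITION & SPEC =====
-- Pre_ is exactly A's no-raise domain: every index A touches (min-1 and max-1 of each
-- consecutive pair, possibly negative, under Python indexing) is in range, and the fare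
-- table covers the n-1 segments.
def Pre_calculate_minimum_trip_cost (n : Int) (m : Int) (plst : List Int) (abclst : List (Int × Int × Int)) : Prop :=
  (∀ pr ∈ plst.zip plst.tail, 1 - n ≤ min pr.1 pr.2 ∧ max pr.1 pr.2 ≤ n) ∧
  n - 1 ≤ (abclst.length : Int)
instance (n : Int) (m : Int) (plst : List Int) (abclst : List (Int × Int × Int)) : Decidable (Pre_calculate_minimum_trip_cost n m plst abclst) := by unfold Pre_calculate_minimum_trip_cost; infer_instance

def pvWitness_calculate_minimum_trip_cost : Int × Int × List Int × (List (Int × Int × Int)) :=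
  (3, 0, [1, 3, 2], [(2, 3, 1), (4, 1, 2)])

-- On trips with a leg from a stop ≤ 0 to a stop ≥ 1 (stations are 1..n, so such input is
-- malformed), A's difference updates hit sec via negative-index wraparound at the array's
-- far end and the accumulate yields an accidental cost (0 at the witness), while B charges
-- exactly the listed segments of that leg (1 at the witness), the intended per-segment cost.
def D_calculate_minimum_trip_cost (n : Int) (m : Int) (plst : List Int) (abclst : List (Int × Int × Int)) : Prop :=
  ∃ pr ∈ plst.zip plst.tail, min pr.1 pr.2 ≤ 0 ∧ 1 ≤ max pr.1 pr.2
instance (n : Int) (m : Int) (plst : List Int) (abclst : List (Int × Int × Int)) : Decidable (D_calculate_minimum_trip_cost n m plst abclst) := by unfold D_calculate_minimum_trip_cost; infer_instance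

def Spec_calculate_minimum_trip_cost (n : Int) (m : Int) (plst : List Int) (abclst : List (Int × Int × Int)) (out : Int) : Prop := ¬ D_calculate_minimum_trip_cost n m plst abclst → out = calculate_minimum_trip_cost_alt n m plst abclst
instance (n : Int) (m : Int) (plst : List Int) (abclst : List (Int × Int × Int)) (out : Int) : Decidable (Spec_calculate_minimum_trip_cost n m plst abclst out) := by unfold Spec_calculate_minimum_trip_cost; infer_instance

def pvDiffWitness_calculate_minimum_trip_cost : Int × Int × List Int × (List (Int × Int × Int)) :=
  (2, 1, [0, 2], [(1, 1, 1)])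
def pvDiffWitnessOut_calculate_minimum_trip_cost : Int × Int := (0, 1)

-- ===== CLAIM (what is proved, stated in full; the proofs are below) =====
def Claim_unchanged_calculate_minimum_trip_cost : Prop := ∀ (n : Int) (m : Int) (plst : List Int) (abclst : List (Int × Int × Int)), Dom_calculate_minimum_trip_cost n m plst abclst → Pre_calculate_minimum_trip_cost n m plst abclst → Spec_calculate_minimum_trip_cost n m plst abclst (calculate_minimum_trip_cost n m plst abclst)
def Claim_changed_calculate_minimum_trip_cost : Prop := Dom_calculate_minimum_trip_cost (pvDiffWitness_calculate_minimum_trip_cost.1) (pvDiffWitness_calculate_minimum_trip_cost.2.1) (pvDiffWitness_calculate_minimum_trip_cost.2.2.1) (pvDiffWitness_calculate_minimum_trip_cost.2.2.2) ∧ Pre_calculate_minimum_trip_cost (pvDiffWitness_calculate_minimum_trip_cost.1) (pvDiffWitness_calculate_minimum_trip_cost.2.1) (pvDiffWitness_calculate_minimum_trip_cost.2.2.1) (pvDiffWitness_calculate_minimum_trip_cost.2.2.2) ∧ D_calculate_minimum_trip_cost (pvDiffWitness_calculate_minimum_trip_cost.1) (pvDiffWitness_calculate_minimum_trip_cost.2.1)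 (pvDiffWitness_calculate_minimum_trip_cost.2.2.1) (pvDiffWitness_calculate_minimum_trip_cost.2.2.2) ∧ calculate_minimum_trip_cost (pvDiffWitness_calculate_minimum_trip_cost.1) (pvDiffWitness_calculate_minimum_trip_cost.2.1) (pvDiffWitness_calculate_minimum_trip_cost.2.2.1) (pvDiffWitness_calculate_minimum_trip_cost.2.2.2) = pvDiffWitnessOut_calculate_minimum_trip_cost.1 ∧ calculate_minimum_trip_cost_alt (pvDiffWitness_calculate_minimum_trip_cost.1) (pvDiffWitness_calculate_minimum_trip_cost.2.1) (pvDiffWitness_calculate_minimum_trip_cost.2.2.1) (pvDiffWitness_calculate_minimum_trip_cost.2.2.2) = pvDiffWitnessOut_calculate_minimum_trip_cost.2 ∧ pvDiffWitnessOut_calculate_minimum_trip_cost.1 ≠ pvDiffWitnessOut_calculate_minimum_trip_cost.2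

-- ===== LEMMAS AND PROOFS =====

theorem pvWitness_ok :
    Dom_calculate_minimum_trip_cost (pvWitness_calculate_minimum_trip_cost.1) (pvWitness_calculate_minimum_trip_cost.2.1) (pvWitness_calculate_minimum_trip_cost.2.2.1) (pvWitness_calculate_minimum_trip_cost.2.2.2) ∧
    Pre_calculate_minimum_trip_cost (pvWitness_calculate_minimum_trip_cost.1) (pvWitness_calculate_minimum_trip_cost.2.1) (pvWitness_calculate_minimum_trip_cost.2.2.1) (pvWitness_calculate_minimum_trip_cost.2.2.2) := by
  decide

theorem length_pvAddAt (xs : List Int) (k v : Int) : (pvAddAt xs k v).length = xs.length := by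
  simp only [pvAddAt]
  split <;> split <;> simp [List.length_modify]

theorem pvAddAt_nonneg (xs : List Int) (k v : Int) (h : 0 ≤ k) :
    pvAddAt xs k v = xs.modify k.toNat (· + v) := by
  simp [pvAddAt, not_lt.mpr h, h]

theorem pvAddAt_wrap (xs : List Int) (k v : Int) (h1 : k < 0) (h2 : 0 ≤ k + xs.length) :
    pvAddAt xs k v = pvAddAt xs (k + xs.length) v := by
  simp [pvAddAt, h1, h2, not_lt.mpr h2]

theorem length_pvAcc (s : Int) (xs : List Int) : (pvAcc s xs).length = xs.length := by
  induction xs generalizing s with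
  | nil => rfl
  | cons x xs ih => simp [pvAcc, ih]

theorem getElem_pvAcc (s : Int) (xs : List Int) (i : Nat) (hi : i < xs.length)
    (h : i < (pvAcc s xs).length) :
    (pvAcc s xs)[i] = s + (xs.take (i + 1)).sum := by
  induction xs generalizing s i with
  | nil => simp at hi
  | cons x xs ih =>
    cases i with
    | zero => simp [pvAcc]
    | succ j =>
      simp only [pvAcc, List.getElem_cons_succ]
      rw [ih (s + x) j (by simpa using hi) (by simp [length_pvAcc]; simpa using hi)]
      simp [List.take_succ_cons]
      ring

theorem sum_take_modify (xs : List Int) (j i : Nat) (v : Int) (hj : j < xs.length) :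
    ((xs.modify j (· + v)).take (i + 1)).sum
      = (xs.take (i + 1)).sum + (if j ≤ i then v else 0) := by
  induction xs generalizing j i with
  | nil => simp at hj
  | cons x xs ih =>
    cases j with
    | zero => simp [List.modify_zero_cons, List.take_succ_cons]; ring
    | succ j' =>
      cases i with
      | zero => simp [List.modify_succ_cons, List.take_succ_cons]
      | succ i' =>
        simp only [List.modify_succ_cons, List.take_succ_cons, List.sum_cons]
        rw [ih j' i' (by simpa using hj)]
        split_ifs with h1 h2 h2 <;> try ring
        · omega
        · omega

-- pointwise effect of one Python `sec[j] += v` on the running prefix sums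
theorem pvAcc_modify (xs : List Int) (j i : Nat) (v : Int) (hj : j < xs.length)
    (hi : i < xs.length) (h1 : i < (pvAcc 0 (xs.modify j (· + v))).length)
    (h2 : i < (pvAcc 0 xs).length) :
    (pvAcc 0 (xs.modify j (· + v)))[i]
      = (pvAcc 0 xs)[i] + (if j ≤ i then v else 0) := by
  rw [getElem_pvAcc 0 _ i (by simp [List.length_modify]; exact hi) h1,
      getElem_pvAcc 0 xs i hi h2, sum_take_modify xs j i v hj]
  ring

theorem length_fill (l : List Int) (s : List Int) :
    (l.foldl (fun s j => pvAddAt s j 1) s).length = s.length := by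
  induction l generalizing s with
  | nil => rfl
  | cons x l ih => simp [List.foldl_cons, ih, length_pvAddAt]

-- pointwise effect of B's inner fill loop `for j in range(a,b): sec[j] += 1`
theorem getElem_fill (k : Nat) (a b : Int) (s : List Int) (hk : (b - a).toNat = k)
    (ha : 0 ≤ a) (hb : b ≤ (s.length : Int)) (i : Nat) (hi : i < s.length)
    (h1 : i < ((PySem.List.pyRange a b 1).foldl (fun s j => pvAddAt s j 1) s).length) :
    ((PySem.List.pyRange a b 1).foldl (fun s j => pvAddAt s j 1) s)[i]
      = s[i] + (if a ≤ (i : Int) ∧ (i : Int) < b then 1 else 0) := by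
  induction k generalizing a s with
  | zero =>
    have hba : b ≤ a := by omega
    simp only [PySem.List.pyRange_one_eq_nil hba, List.foldl_nil]
    rw [if_neg (by omega)]
    ring
  | succ k ih =>
    have hab : a < b := by omega
    have hmod : pvAddAt s a 1 = s.modify a.toNat (· + 1) := pvAddAt_nonneg s a 1 ha
    have hlen : (s.modify a.toNat (· + 1)).length = s.length := by
      simp [List.length_modify]
    have h1' : i < ((PySem.List.pyRange (a + 1) b 1).foldl (fun s j => pvAddAt s j 1)
        (s.modify a.toNat (· + 1))).length := by
      rw [length_fill, hlen]; exact hi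
    have hih := ih (a + 1) (s.modify a.toNat (· + 1)) (by omega) (by omega) (by omega)
      (by rw [hlen]; exact hi) h1'
    have key : (PySem.List.pyRange a b 1).foldl (fun s j => pvAddAt s j 1) s
        = (PySem.List.pyRange (a + 1) b 1).foldl (fun s j => pvAddAt s j 1)
            (s.modify a.toNat (· + 1)) := by
      rw [PySem.List.pyRange_one_cons hab]
      simp only [List.foldl_cons, hmod]
    simp only [key]
    rw [hih, List.getElem_modify]
    have hta : (a.toNat : Int) = a := Int.toNat_of_nonneg ha
    set x := s[i] with hx
    split_ifs <;> omega

-- B's fill over an all-negative range equals the fill over the wrapped range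
theorem fill_shift (k : Nat) (a b : Int) (s : List Int) (hk : (b - a).toNat = k)
    (hb : b ≤ 0) (hwa : 0 ≤ a + (s.length : Int)) :
    (PySem.List.pyRange a b 1).foldl (fun s j => pvAddAt s j 1) s
      = (PySem.List.pyRange (a + (s.length : Int)) (b + (s.length : Int)) 1).foldl
          (fun s j => pvAddAt s j 1) s := by
  induction k generalizing a s with
  | zero =>
    rw [PySem.List.pyRange_one_eq_nil (by omega), PySem.List.pyRange_one_eq_nil (by omega)]
  | succ k ih =>
    have hab : a < b := by omega
    rw [PySem.List.pyRange_one_cons hab,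
        PySem.List.pyRange_one_cons (show a + (s.length : Int) < b + (s.length : Int) by omega)]
    simp only [List.foldl_cons]
    rw [← pvAddAt_wrap s a 1 (by omega) hwa]
    have hlen := length_pvAddAt s a 1
    have hih := ih (a + 1) (pvAddAt s a 1) (by omega)
      (by rw [hlen]; omega)
    rw [hih, hlen]
    have e : a + 1 + (s.length : Int) = a + (s.length : Int) + 1 := by ring
    rw [e]

-- one in-range pair update: A's two-point difference, prefix-summed, = B's range fill
theorem step_core (d : List Int) (a b : Int)
    (ha : 0 ≤ a) (hab : a ≤ b) (hbl : b < (d.length : Int)) :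
    pvAcc 0 (pvAddAt (pvAddAt d a 1) b (-1))
      = (PySem.List.pyRange a b 1).foldl (fun s j => pvAddAt s j 1) (pvAcc 0 d) := by
  rw [pvAddAt_nonneg d a 1 ha, pvAddAt_nonneg _ b (-1) (by omega)]
  apply List.ext_getElem
  · simp [length_pvAcc, List.length_modify, length_fill]
  · intro i hi1 hi2
    have hid : i < d.length := by
      simpa [length_pvAcc, List.length_modify] using hi1
    have hta : (a.toNat : Int) = a := Int.toNat_of_nonneg ha
    have htb : (b.toNat : Int) = b := Int.toNat_of_nonneg (by omega)
    rw [pvAcc_modify _ b.toNat i (-1) (by simp [List.length_modify]; omega)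
        (by simp [List.length_modify]; exact hid) hi1
        (by simp [length_pvAcc, List.length_modify]; exact hid)]
    rw [pvAcc_modify d a.toNat i 1 (by omega) hid
        (by simp [length_pvAcc, List.length_modify]; exact hid)
        (by simp [length_pvAcc]; exact hid)]
    rw [getElem_fill (b - a).toNat a b (pvAcc 0 d) rfl ha
        (by rw [length_pvAcc]; omega) i (by rw [length_pvAcc]; exact hid) hi2]
    split_ifs <;> omega

-- one pair, natural or fully-wrapped (not crossing 0): A's step = B's step
theorem step_any (d : List Int) (p q : Int)
    (h1 : 1 - (d.length : Int) ≤ min p q) (h2 : max p q ≤ (d.length : Int))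
    (hnc : ¬(min p q ≤ 0 ∧ 1 ≤ max p q)) :
    pvAcc 0 (pvAddAt (pvAddAt d (min p q - 1) 1) (max p q - 1) (-1))
      = (PySem.List.pyRange (min p q - 1) (max p q - 1) 1).foldl
          (fun s j => pvAddAt s j 1) (pvAcc 0 d) := by
  have hmm : min p q ≤ max p q := min_le_max
  by_cases hpos : 1 ≤ min p q
  · exact step_core d (min p q - 1) (max p q - 1) (by omega) (by omega) (by omega)
  · have hneg : max p q ≤ 0 := by omega
    rw [pvAddAt_wrap d (min p q - 1) 1 (by omega) (by omega)]
    have hNl := length_pvAddAt d (min p q - 1 + (d.length : Int)) 1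
    rw [pvAddAt_wrap _ (max p q - 1) (-1) (by omega) (by rw [hNl]; push_cast; omega)]
    rw [hNl]
    rw [step_core d (min p q - 1 + d.length) (max p q - 1 + d.length)
        (by omega) (by omega) (by omega)]
    rw [fill_shift (max p q - 1 - (min p q - 1)).toNat (min p q - 1) (max p q - 1)
        (pvAcc 0 d) rfl (by omega) (by rw [length_pvAcc]; omega)]
    rw [length_pvAcc]

-- the whole pair loop: A's sec (after accumulate) = B's sec
theorem fold_eq (ps : List (Int × Int)) (d : List Int)
    (hv : ∀ pr ∈ ps, (1 - (d.length : Int) ≤ min pr.1 pr.2 ∧ max pr.1 pr.2 ≤ (d.length : Int))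
      ∧ ¬(min pr.1 pr.2 ≤ 0 ∧ 1 ≤ max pr.1 pr.2)) :
    pvAcc 0 (ps.foldl
        (fun sec pr => pvAddAt (pvAddAt sec (min pr.1 pr.2 - 1) 1) (max pr.1 pr.2 - 1) (-1)) d)
      = ps.foldl
          (fun sec pr => (PySem.List.pyRange (min pr.1 pr.2 - 1) (max pr.1 pr.2 - 1) 1).foldl
            (fun s j => pvAddAt s j 1) sec) (pvAcc 0 d) := by
  induction ps generalizing d with
  | nil => rfl
  | cons pr ps ih =>
    simp only [List.foldl_cons]
    have hpr := hv pr (List.mem_cons_self ..)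
    have hd' : (pvAddAt (pvAddAt d (min pr.1 pr.2 - 1) 1) (max pr.1 pr.2 - 1) (-1)).length
        = d.length := by simp [length_pvAddAt]
    rw [ih _ (by intro x hx; rw [hd']; exact hv x (List.mem_cons_of_mem _ hx)),
        step_any d pr.1 pr.2 hpr.1.1 hpr.1.2 hpr.2]

theorem length_fillfold (ps : List (Int × Int)) (s : List Int) :
    (ps.foldl (fun sec pr => (PySem.List.pyRange (min pr.1 pr.2 - 1) (max pr.1 pr.2 - 1) 1).foldl
        (fun s j => pvAddAt s j 1) sec) s).length = s.length := by
  induction ps generalizing s with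
  | nil => rfl
  | cons pr ps ih => simp [List.foldl_cons, ih, length_fill]

theorem pvAcc_replicate (k : Nat) : pvAcc 0 (List.replicate k (0 : Int)) = List.replicate k 0 := by
  induction k with
  | zero => rfl
  | succ k ih => simp [List.replicate_succ, pvAcc, ih]

-- A's cost loop over range(n-1) with indexing = B's zip/map/sum over the sliced fare table
theorem cost_eq (n : Int) (abclst : List (Int × Int × Int)) (sec : List Int)
    (hlen : sec.length = n.toNat) (habc : n - 1 ≤ (abclst.length : Int)) :
    (PySem.List.pyRange 0 (n - 1) 1).foldl
      (fun ans i =>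
        let abc := PySem.List.pyGetD abclst i (0, 0, 0)
        let s := PySem.List.pyGetD sec i 0
        ans + min (abc.1 * s) (abc.2.1 * s + abc.2.2)) 0
    = (((PySem.List.slice abclst none (some (n - 1))).zip sec).map
        (fun x => min (x.1.1 * x.2) (x.1.2.1 * x.2 + x.1.2.2))).sum := by
  by_cases hn : n ≤ 0
  · have hsec : sec = [] := by
      have : n.toNat = 0 := by omega
      simpa [this, List.length_eq_zero_iff] using hlen
    rw [PySem.List.pyRange_one_eq_nil (by omega)]
    simp [hsec]
  · have hn : 0 < n := by omega
    have hk : (0 : Int) ≤ n - 1 := by omega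
    rw [PySem.List.slice_to abclst hk]
    rw [PySem.List.foldl_add]
    rw [zero_add]
    apply congrArg
    apply List.ext_getElem
    · simp [PySem.List.length_pyRange_one, List.length_take, hlen]
      omega
    · intro i hi1 hi2
      have hik : i < (n - 1).toNat := by
        simpa [PySem.List.length_pyRange_one] using hi1
      have hia : i < abclst.length := by omega
      have his : i < sec.length := by omega
      simp only [List.getElem_map, PySem.List.getElem_pyRange_one, zero_add,
        List.getElem_zip, List.getElem_take]
      rw [PySem.List.pyGetD_natCast, PySem.List.pyGetD_natCast]
      simp [List.getD_eq_getElem?_getD, List.getElem?_eq_getElem hia,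
        List.getElem?_eq_getElem his]

-- ===== VERDICT (by name: the statement is the Claim_ definition above) =====
theorem calculate_minimum_trip_cost_spec : Claim_unchanged_calculate_minimum_trip_cost := by
  intro n m plst abclst _ hpre
  unfold Spec_calculate_minimum_trip_cost
  intro hnd
  unfold calculate_minimum_trip_cost calculate_minimum_trip_cost_alt
  simp only [PySem.List.slice_from_one]
  obtain ⟨hv, habc⟩ := hpre
  unfold D_calculate_minimum_trip_cost at hnd
  push_neg at hnd
  rw [fold_eq _ _ (by
    intro pr hpr
    have hlen : ((List.replicate n.toNat (0 : Int)).length : Int) = (n.toNat : Int) := by simp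
    refine ⟨⟨?_, ?_⟩, ?_⟩
    · rw [hlen]
      have := (hv pr hpr).1
      have := Int.self_le_toNat n
      omega
    · rw [hlen]
      have := (hv pr hpr).2
      have h0 : min pr.1 pr.2 ≤ max pr.1 pr.2 := min_le_max
      have := (hv pr hpr).1
      by_cases hc : max pr.1 pr.2 ≤ 0
      · omega
      · have := hnd pr hpr
        omega
    · intro hc
      exact absurd (hnd pr hpr hc.1) (not_lt.mpr hc.2)), pvAcc_replicate]
  exact cost_eq n abclst _ (by rw [length_fillfold]; simp) habc

theorem calculate_minimum_trip_cost_changed : Claim_changed_calculate_minimum_trip_cost := by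
  unfold Claim_changed_calculate_minimum_trip_cost; decide
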